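-- pv_equiv track=rewrite | github.com/clubalgoritmos/CompetitiveProgramming | RPC06/D.py | cp
-- ===== SOURCE A (Python) =====
-- MOD = 10**9 + 7
--
-- def cp(N):
--     if N == 1:
--         return 0
--
--     mx_d = 9 * N
--     prev_dp = [0] * (2 * mx_d + 1)
--     curr_dp = [0] * (2 * mx_d + 1)
--     prev_dp[mx_d] = 1
--
--     for n in range(1, N + 1):
--         for s in range(-mx_d, mx_d + 1):
--             base = prev_dp[s + mx_d]
--             if base > 0:
--                 for da in range(10):
--                     for db in range(10):
--                         if da != db:
--                             if n == 1 and (da == 0 or db == 0):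
--                                 continue
--                             ns = s + da - db
--                             if -mx_d <= ns <= mx_d:
--                                 curr_dp[ns + mx_d] += base
--                                 if curr_dp[ns + mx_d] >= MOD:
--                                     curr_dp[ns + mx_d] -= MOD
--         prev_dp, curr_dp = curr_dp, [0] * (2 * mx_d + 1)
--
--     return prev_dp[mx_d]
-- ===== SOURCE B (Python) =====
-- MOD = 10**9 + 7
--
-- def _mul(a, b):
--     out = [0] * (len(a) + len(b) - 1)
--     for i, x in enumerate(a):
--         if x:
--             for j, y in enumerate(b):
--                 out[i + j] = (out[i + j] + x * y) % MOD
--     return out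
--
-- def cp(N):
--     if N == 1:
--         return 0
--     # generating polynomial of one digit position (coefficient of x^(d+offset)
--     # = number of ordered digit pairs with difference d)
--     first = [0 if d == 0 else 9 - abs(d) for d in range(-8, 9)]
--     rest = [0 if d == 0 else 10 - abs(d) for d in range(-9, 10)]
--     # rest^(N-1) by exponentiation by squaring
--     acc = [1]
--     base = rest
--     e = N - 1
--     while e > 0:
--         if e & 1:
--             acc = _mul(acc, base)
--         base = _mul(base, base)
--         e >>= 1
--     final = _mul(first, acc)
--     return final[(len(final) - 1) // 2]
-- ===== Notes on version B (the rewrite author's own statement) =====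
-- stated objective: faster
-- what changed: B abandons A's row-by-row DP over all partial digit-sum differences and instead computes the central coefficient of first(x)*rest(x)^(N-1), raising the one-position difference polynomial to the (N-1)-th power by exponentiation by squaring over plain convolutions.
-- outside the precondition, e.g. on cp(0): A returns 1, B returns 0
import Mathlib
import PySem

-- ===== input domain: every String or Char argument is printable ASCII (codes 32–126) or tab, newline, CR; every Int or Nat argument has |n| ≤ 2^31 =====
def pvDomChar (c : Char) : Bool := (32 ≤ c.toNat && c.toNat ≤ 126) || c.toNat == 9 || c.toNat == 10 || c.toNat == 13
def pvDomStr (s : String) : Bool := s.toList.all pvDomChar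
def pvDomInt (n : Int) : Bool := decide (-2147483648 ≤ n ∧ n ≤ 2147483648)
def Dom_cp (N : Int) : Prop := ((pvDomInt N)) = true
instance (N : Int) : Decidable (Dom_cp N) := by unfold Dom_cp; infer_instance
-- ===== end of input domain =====

-- B computes the answer as the central coefficient of first·rest^(N-1), with the
-- polynomial power obtained by exponentiation by squaring over plain convolutions,
-- instead of A's row-by-row DP over all partial digit-sum differences.

def pvMOD : Int := 1000000007

-- ===== PORT A =====
def cpInner (n mxd s base : Int) (curr : List Int) : List Int :=
  (PySem.List.pyRange 0 10 1).foldl (fun curr da =>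
    (PySem.List.pyRange 0 10 1).foldl (fun curr db =>
      if da ≠ db then
        if n = 1 ∧ (da = 0 ∨ db = 0) then curr
        else
          let ns := s + da - db
          if -mxd ≤ ns ∧ ns ≤ mxd then
            let v := PySem.List.pyGetD curr (ns + mxd) 0 + base
            PySem.List.pySetD curr (ns + mxd) (if v ≥ pvMOD then v - pvMOD else v)
          else curr
      else curr) curr) curr

def cpRow (n mxd : Int) (prev : List Int) : List Int :=
  (PySem.List.pyRange (-mxd) (mxd+1) 1).foldl (fun curr s =>
    let base := PySem.List.pyGetD prev (s + mxd) 0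
    if base > 0 then cpInner n mxd s base curr else curr)
    (List.replicate (2*mxd+1).toNat 0)

def cp (N : Int) : Int :=
  if N = 1 then 0
  else
    let mxd := 9 * N
    -- Python's 'prev_dp[mx_d] = 1' raises IndexError when N < 0; Pre_cp excludes N ≤ 0,
    -- and on Pre_ the index is always in range, where pySetD is exact.
    let prev0 := PySem.List.pySetD (List.replicate (2*mxd+1).toNat 0) mxd 1
    let prev := (PySem.List.pyRange 1 (N+1) 1).foldl (fun prev n => cpRow n mxd prev) prev0
    PySem.List.pyGetD prev mxd 0

-- ===== PORT B =====
-- out[i+j] = (out[i+j] + x*y) % MOD : the index is nonnegative and in range on every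
-- reachable call, where pyGetD/pySetD are exact.
def pvMulInner (i x : Int) (b out : List Int) : List Int :=
  (PySem.List.enumerate b).foldl (fun out jy =>
    PySem.List.pySetD out (i + jy.1)
      (PySem.Int.mod (PySem.List.pyGetD out (i + jy.1) 0 + x * jy.2) pvMOD)) out

def pvMul (a b : List Int) : List Int :=
  (PySem.List.enumerate a).foldl (fun out ix =>
    if ix.2 ≠ 0 then pvMulInner ix.1 ix.2 b out else out)
    (List.replicate (a.length + b.length - 1) 0)

def pvPowLoop (acc base : List Int) (e : Int) : List Int :=
  if h : 0 < e then
    pvPowLoop (if PySem.Int.band e 1 = 1 then pvMul acc base else acc)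
      (pvMul base base) (PySem.Int.floordiv e 2)
  else acc
termination_by e.toNat
decreasing_by
  have := PySem.Int.floordiv_eq_ediv_of_pos (a := e) (b := 2) (by norm_num)
  omega

def cp_alt (N : Int) : Int :=
  if N = 1 then 0
  else
    let first := (PySem.List.pyRange (-8) 9 1).map (fun d => if d = 0 then 0 else 9 - |d|)
    let rest := (PySem.List.pyRange (-9) 10 1).map (fun d => if d = 0 then 0 else 10 - |d|)
    let final := pvMul first (pvPowLoop [1] rest (N - 1))
    PySem.List.pyGetD final (PySem.Int.floordiv ((final.length : Int) - 1) 2) 0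

-- ===== PRECONDITION & SPEC =====
-- Pre_cp excludes N ≤ 0: for negative N the Python A raises IndexError
-- ('prev_dp[mx_d] = 1' on an empty list), and N = 0 is a degenerate corner (a count
-- over zero-digit numbers) where A's 1 (empty product) and B's 0 are both defensible.
def Pre_cp (N : Int) : Prop := 1 ≤ N
instance (N : Int) : Decidable (Pre_cp N) := by unfold Pre_cp; infer_instance
def pvWitness_cp : Int := 3

def Spec_cp (N : Int) (out : Int) : Prop := out = cp_alt N
instance (N : Int) (out : Int) : Decidable (Spec_cp N out) := by unfold Spec_cp; infer_instance

-- ===== CLAIM (what is proved, stated in full; the proofs are below) =====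
def Claim_equal_cp : Prop := ∀ (N : Int), Dom_cp N → Pre_cp N → Spec_cp N (cp N)

-- ===== LEMMAS AND PROOFS =====

-- pvW first d = number of ordered digit pairs (da, db) with da - db = d
-- (first = true: both digits 1..9; else both 0..9; always da ≠ db).
def pvW (first : Bool) (d : Int) : Int :=
  if d = 0 then 0
  else if first then (if |d| ≤ 8 then 9 - |d| else 0)
  else (if |d| ≤ 9 then 10 - |d| else 0)

-- pvC m s : the (mod pvMOD) number of pairs of m-position digit-difference
-- sequences summing to s; the common mathematical description of both programs.
def pvC : Nat → Int → Int
  | 0, s => if s = 0 then 1 else 0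
  | m+1, s => (((PySem.List.pyRange (-9) 10 1).map (fun d => pvW (m == 0) d * pvC m (s - d))).sum) % pvMOD

lemma pvW_eq_zero (first : Bool) (d : Int) (h : 9 < |d|) : pvW first d = 0 := by
  obtain h' | h' := abs_cases d <;> (unfold pvW; split_ifs <;> omega)

lemma pvW_first_eq_zero (d : Int) (h : 8 < |d|) : pvW true d = 0 := by
  obtain h' | h' := abs_cases d <;> (unfold pvW; split_ifs <;> first | omega | simp_all)

lemma pvW_nonneg (first : Bool) (d : Int) : 0 ≤ pvW first d := by
  obtain h' | h' := abs_cases d <;> (unfold pvW; split_ifs <;> omega)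

lemma pvW_lt (first : Bool) (d : Int) : pvW first d < pvMOD := by
  obtain h' | h' := abs_cases d <;> (unfold pvW pvMOD; split_ifs <;> omega)

lemma pvC_nonneg (m : Nat) (s : Int) : 0 ≤ pvC m s := by
  cases m with
  | zero => simp only [pvC]; split <;> norm_num
  | succ m => exact Int.emod_nonneg _ (by norm_num [pvMOD])

lemma pvC_lt (m : Nat) (s : Int) : pvC m s < pvMOD := by
  cases m with
  | zero => simp only [pvC]; split <;> norm_num [pvMOD]
  | succ m => exact Int.emod_lt_of_pos _ (by norm_num [pvMOD])

theorem sum_Icc_top (a b : Int) (f : Int → Int) (h : a ≤ b) :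
    ∑ x ∈ Finset.Icc a b, f x = (∑ x ∈ Finset.Icc a (b-1), f x) + f b := by
  have hins : Finset.Icc a b = insert b (Finset.Icc a (b-1)) := by
    ext x; simp only [Finset.mem_Icc, Finset.mem_insert]; omega
  rw [hins, Finset.sum_insert (by simp only [Finset.mem_Icc]; omega)]
  ring

theorem pyRange_sum_Icc (a : Int) (f : Int → Int) :
    ∀ (b : Int), ((PySem.List.pyRange a b 1).map f).sum = ∑ x ∈ Finset.Icc a (b-1), f x := by
  intro b
  rw [PySem.List.pyRange_one]
  induction h : (b - a).toNat generalizing b with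
  | zero =>
      have : Finset.Icc a (b-1) = ∅ := by apply Finset.Icc_eq_empty; omega
      simp [this, List.range_zero]
  | succ n ih =>
      have h2 : (b - 1 - a).toNat = n := by omega
      have hsum := ih (b-1) h2
      rw [List.range_succ]
      rw [sum_Icc_top a (b-1) f (by omega)]
      simp only [List.map_append, List.map_map, List.sum_append] at *
      rw [hsum]
      have hn : a + (n:Int) = b - 1 := by omega
      simp [hn]

lemma pvC_succ (m : Nat) (s : Int) :
    pvC (m+1) s = (∑ d ∈ Finset.Icc (-9:Int) 9, pvW (m == 0) d * pvC m (s - d)) % pvMOD := by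
  rw [pvC, pyRange_sum_Icc]
  norm_num

lemma pvC_vanish : ∀ (m : Nat) (s : Int), 9 * (m:Int) < |s| → pvC m s = 0 := by
  intro m
  induction m with
  | zero =>
      intro s h
      simp only [pvC]
      rw [if_neg (by obtain h' | h' := abs_cases s <;> omega)]
  | succ m ih =>
      intro s h
      rw [pvC_succ]
      have hz : ∀ d ∈ Finset.Icc (-9:Int) 9, pvW (m == 0) d * pvC m (s - d) = 0 := by
        intro d hd
        simp only [Finset.mem_Icc] at hd
        by_cases h9 : 9 < |d|
        · rw [pvW_eq_zero _ _ h9, zero_mul]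
        · rw [ih (s - d) (by push_cast at h ⊢; obtain h1 | h1 := abs_cases s <;> obtain h2 | h2 := abs_cases (s - d) <;> omega), mul_zero]
      rw [Finset.sum_congr rfl hz]
      simp

lemma pvC_one_zero : pvC 1 0 = 0 := by decide

lemma pvC_one (s : Int) : pvC 1 s = pvW true s := by
  rw [show (1:Nat) = 0 + 1 from rfl, pvC_succ]
  simp only [show (0 == 0) = true from rfl]
  have h1 : ∀ d ∈ Finset.Icc (-9:Int) 9, pvW true d * pvC 0 (s - d)
      = if d = s then pvW true d else 0 := by
    intro d _
    simp only [pvC]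
    by_cases hds : d = s
    · subst hds; rw [if_pos (by omega), if_pos rfl, mul_one]
    · rw [if_neg (by omega), if_neg hds, mul_zero]
  rw [Finset.sum_congr rfl h1, Finset.sum_ite_eq' (Finset.Icc (-9:Int) 9) s (fun d => pvW true d)]
  by_cases hs : s ∈ Finset.Icc (-9:Int) 9
  · rw [if_pos hs]
    exact Int.emod_eq_of_lt (pvW_nonneg _ _) (pvW_lt _ _)
  · rw [if_neg hs]
    simp only [Finset.mem_Icc] at hs
    rw [pvW_eq_zero true s (by obtain h' | h' := abs_cases s <;> omega)]
    rfl

lemma pvC_vanish' : ∀ (m : Nat) (s : Int), 1 ≤ m → 9 * (m:Int) - 1 < |s| → pvC m s = 0 := by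
  intro m
  induction m with
  | zero => intro s h; omega
  | succ m ih =>
      intro s _ h
      cases m with
      | zero =>
          rw [pvC_one]
          exact pvW_first_eq_zero s (by push_cast at h; omega)
      | succ m' =>
          rw [pvC_succ]
          have hz : ∀ d ∈ Finset.Icc (-9:Int) 9, pvW (m'+1 == 0) d * pvC (m'+1) (s - d) = 0 := by
            intro d hd
            simp only [Finset.mem_Icc] at hd
            rw [ih (s - d) (by omega)
              (by push_cast at h ⊢; obtain h1 | h1 := abs_cases s <;> obtain h2 | h2 := abs_cases (s - d) <;> omega), mul_zero]
          rw [Finset.sum_congr rfl hz]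
          simp

-- a double loop is a single loop over the pair list
lemma foldl_foldl_flatMap {α β γ : Type} (l : List α) (l' : List β)
    (g : γ → α → β → γ) (init : γ) :
    l.foldl (fun a x => l'.foldl (fun a y => g a x y) a) init
      = (l.flatMap (fun x => l'.map (fun y => (x, y)))).foldl (fun a p => g a p.1 p.2) init := by
  induction l generalizing init with
  | nil => rfl
  | cons x xs ih => simp [List.foldl_append, List.foldl_map, ih]

def pvUpd (base : Int) (c : List Int) (t : Int) : List Int :=
  PySem.List.pySetD c t
    (if PySem.List.pyGetD c t 0 + base ≥ pvMOD then PySem.List.pyGetD c t 0 + base - pvMOD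
     else PySem.List.pyGetD c t 0 + base)

lemma scatter (base : Int) (hb0 : 0 ≤ base) (hb1 : base < pvMOD) :
    ∀ (ts : List Int) (c : List Int),
      (∀ t ∈ ts, 0 ≤ t ∧ t < (c.length:Int)) →
      (∀ j : Int, 0 ≤ j → j < (c.length:Int) → 0 ≤ PySem.List.pyGetD c j 0 ∧ PySem.List.pyGetD c j 0 < pvMOD) →
      (ts.foldl (pvUpd base) c).length = c.length ∧
      (∀ j : Int, 0 ≤ j → j < (c.length:Int) →
        PySem.List.pyGetD (ts.foldl (pvUpd base) c) j 0
          = (PySem.List.pyGetD c j 0 + (ts.count j : Int) * base) % pvMOD) := by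
  intro ts
  induction ts with
  | nil =>
      intro c hin hred
      refine ⟨rfl, fun j hj0 hj1 => ?_⟩
      simp only [List.foldl_nil, List.count_nil]
      have := hred j hj0 hj1
      rw [show ((0:Nat):Int) * base = 0 from by ring, add_zero]
      rw [Int.emod_eq_of_lt this.1 this.2]
  | cons t ts ih =>
      intro c hin hred
      obtain ⟨ht0, ht1⟩ := hin t (by simp)
      have hv := hred t ht0 ht1
      have hmodeq : (if PySem.List.pyGetD c t 0 + base ≥ pvMOD then PySem.List.pyGetD c t 0 + base - pvMOD
          else PySem.List.pyGetD c t 0 + base) = (PySem.List.pyGetD c t 0 + base) % pvMOD := by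
        simp only [pvMOD] at *
        split_ifs with hge <;> omega
      have hlen' : (pvUpd base c t).length = c.length := by
        unfold pvUpd
        rw [PySem.List.pySetD_of_nonneg _ _ ht0]
        exact List.length_set ..
      have hget' : ∀ j : Int, 0 ≤ j → j < (c.length:Int) →
          PySem.List.pyGetD (pvUpd base c t) j 0
            = if j = t then (PySem.List.pyGetD c t 0 + base) % pvMOD else PySem.List.pyGetD c j 0 := by
        intro j hj0 hj1
        unfold pvUpd
        rw [hmodeq]
        have hjc : j = ((j.toNat:Nat):Int) := by omega
        have htc : t = ((t.toNat:Nat):Int) := by omega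
        rw [hjc, htc, PySem.List.pyGetD_pySetD_natCast _ _ _ _ _ (by omega)]
        by_cases hjt : j.toNat = t.toNat
        · rw [if_pos hjt, if_pos (by omega), ← htc]
        · rw [if_neg hjt, if_neg (by omega), ← hjc]
      have hred' : ∀ j : Int, 0 ≤ j → j < ((pvUpd base c t).length:Int) →
          0 ≤ PySem.List.pyGetD (pvUpd base c t) j 0 ∧ PySem.List.pyGetD (pvUpd base c t) j 0 < pvMOD := by
        intro j hj0 hj1
        rw [hlen'] at hj1
        rw [hget' j hj0 hj1]
        split_ifs
        · exact ⟨Int.emod_nonneg _ (by norm_num [pvMOD]), Int.emod_lt_of_pos _ (by norm_num [pvMOD])⟩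
        · exact hred j hj0 hj1
      have hin' : ∀ x ∈ ts, 0 ≤ x ∧ x < (((pvUpd base c t).length):Int) := by
        intro x hx; rw [hlen']; exact hin x (by simp [hx])
      obtain ⟨ihlen, ihget⟩ := ih (pvUpd base c t) hin' hred'
      constructor
      · simp only [List.foldl_cons]; rw [ihlen, hlen']
      · intro j hj0 hj1
        simp only [List.foldl_cons]
        rw [ihget j hj0 (by rw [hlen']; exact hj1)]
        rw [hget' j hj0 hj1]
        by_cases hjt : j = t
        · subst hjt
          rw [if_pos rfl, List.count_cons_self]
          rw [Int.emod_add_emod]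
          push_cast
          ring_nf
        · rw [if_neg hjt, List.count_cons_of_ne (by exact fun he => hjt he.symm)]

def P100 : List (Int × Int) :=
  (PySem.List.pyRange 0 10 1).flatMap (fun da => (PySem.List.pyRange 0 10 1).map (fun db => (da, db)))

lemma countA (first : Bool) (δ : Int) :
    P100.countP (fun p => decide (p.1 ≠ p.2 ∧ ¬(first = true ∧ (p.1 = 0 ∨ p.2 = 0)) ∧ p.1 - p.2 = δ))
      = (pvW first δ).toNat := by
  by_cases h9 : -9 ≤ δ ∧ δ ≤ 9
  · obtain ⟨h1, h2⟩ := h9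
    cases first <;> (interval_cases δ <;> decide)
  · rw [List.countP_eq_zero.mpr, pvW]
    · split_ifs with hz hf h8 <;> first
        | rfl
        | (exfalso; obtain h' | h' := abs_cases δ <;> omega)
    · intro p hp
      simp only [P100, List.mem_flatMap, List.mem_map, PySem.List.mem_pyRange_one] at hp
      obtain ⟨da, ⟨hda0, hda1⟩, db, ⟨hdb0, hdb1⟩, rfl⟩ := hp
      simp only [decide_eq_true_eq, not_and, not_or]
      intro h
      omega

abbrev Qprop (n mxd s : Int) (p : Int × Int) : Prop :=
  p.1 ≠ p.2 ∧ ¬(n = 1 ∧ (p.1 = 0 ∨ p.2 = 0)) ∧ (-mxd ≤ s + p.1 - p.2 ∧ s + p.1 - p.2 ≤ mxd)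

lemma cpInner_eq_scatter (n mxd s base : Int) (curr : List Int) :
    cpInner n mxd s base curr
      = ((P100.filter (fun p => decide (Qprop n mxd s p))).map (fun p => s + p.1 - p.2 + mxd)).foldl
          (pvUpd base) curr := by
  unfold cpInner
  dsimp only
  rw [foldl_foldl_flatMap (g := fun c da db =>
      if da ≠ db then
        if n = 1 ∧ (da = 0 ∨ db = 0) then c
        else
          if -mxd ≤ s + da - db ∧ s + da - db ≤ mxd then
            PySem.List.pySetD c (s + da - db + mxd)
              (if PySem.List.pyGetD c (s + da - db + mxd) 0 + base ≥ pvMOD then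
                 PySem.List.pyGetD c (s + da - db + mxd) 0 + base - pvMOD
               else PySem.List.pyGetD c (s + da - db + mxd) 0 + base)
          else c
      else c)]
  rw [List.foldl_map]
  rw [← PySem.List.foldl_ite_eq_foldl_filter (p := Qprop n mxd s)
      (f := fun c p => pvUpd base c (s + p.1 - p.2 + mxd))]
  apply PySem.List.foldl_congr_mem
  intro acc p _
  unfold Qprop pvUpd
  by_cases h1 : p.1 ≠ p.2
  · by_cases h2 : n = 1 ∧ (p.1 = 0 ∨ p.2 = 0)
    · rw [if_pos h1, if_pos h2, if_neg (by tauto)]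
    · by_cases h3 : -mxd ≤ s + p.1 - p.2 ∧ s + p.1 - p.2 ≤ mxd
      · have hQ : p.1 ≠ p.2 ∧ ¬(n = 1 ∧ (p.1 = 0 ∨ p.2 = 0)) ∧ (-mxd ≤ s + p.1 - p.2 ∧ s + p.1 - p.2 ≤ mxd) :=
          ⟨h1, h2, h3⟩
        rw [if_pos h1, if_neg h2, if_pos h3, if_pos hQ]
      · rw [if_pos h1, if_neg h2, if_neg h3, if_neg (by tauto)]
  · rw [if_neg h1, if_neg (by tauto)]

lemma cpInner_spec (first : Bool) (n mxd s base : Int) (hf : n = 1 ↔ first = true)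
    (hb0 : 0 ≤ base) (hb1 : base < pvMOD) (c : List Int) (hlen : (c.length:Int) = 2*mxd+1)
    (hred : ∀ j : Int, 0 ≤ j → j < (c.length:Int) →
      0 ≤ PySem.List.pyGetD c j 0 ∧ PySem.List.pyGetD c j 0 < pvMOD) :
    (cpInner n mxd s base c).length = c.length ∧
    (∀ j : Int, 0 ≤ j → j < (c.length:Int) →
      PySem.List.pyGetD (cpInner n mxd s base c) j 0
        = (PySem.List.pyGetD c j 0 + pvW first (j - mxd - s) * base) % pvMOD) := by
  rw [cpInner_eq_scatter]
  have hin : ∀ t ∈ (P100.filter (fun p => decide (Qprop n mxd s p))).map (fun p => s + p.1 - p.2 + mxd),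
      0 ≤ t ∧ t < (c.length:Int) := by
    intro t ht
    simp only [List.mem_map, List.mem_filter, decide_eq_true_eq] at ht
    obtain ⟨p, ⟨_, hQ⟩, rfl⟩ := ht
    obtain ⟨_, _, h3, h4⟩ := hQ
    omega
  obtain ⟨hL, hG⟩ := scatter base hb0 hb1 _ c hin hred
  refine ⟨hL, fun j hj0 hj1 => ?_⟩
  rw [hG j hj0 hj1]
  congr 2
  rw [List.count_eq_countP, List.countP_map, List.countP_filter]
  rw [List.countP_congr (q := fun p =>
      decide (p.1 ≠ p.2 ∧ ¬(first = true ∧ (p.1 = 0 ∨ p.2 = 0)) ∧ p.1 - p.2 = j - mxd - s))]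
  · rw [countA first (j - mxd - s)]
    rw [Int.toNat_of_nonneg (pvW_nonneg _ _)]
  · intro p _
    simp only [Function.comp_apply, Bool.and_eq_true, beq_iff_eq, decide_eq_true_eq]
    unfold Qprop
    constructor
    · rintro ⟨hj, h1, h2, h3⟩
      exact ⟨h1, by rw [← hf]; exact h2, by omega⟩
    · rintro ⟨h1, h2, h3⟩
      exact ⟨by omega, h1, by rw [hf]; exact h2, by omega⟩

lemma rowAux (first : Bool) (n mxd : Int) (m : Nat) (hf : n = 1 ↔ first = true)
    (prev : List Int)
    (hprev : ∀ i : Int, 0 ≤ i → i < 2*mxd+1 → PySem.List.pyGetD prev i 0 = pvC m (i - mxd)) :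
    ∀ (k : Nat) (σ : Int) (curr : List Int), σ + k = mxd + 1 → -mxd ≤ σ →
    (curr.length:Int) = 2*mxd+1 →
    (∀ j : Int, 0 ≤ j → j < 2*mxd+1 →
      PySem.List.pyGetD curr j 0
        = (∑ s ∈ Finset.Icc (-mxd) (σ-1), pvW first (j - mxd - s) * pvC m s) % pvMOD) →
    (((PySem.List.pyRange σ (mxd+1) 1).foldl (fun curr s =>
        let base := PySem.List.pyGetD prev (s + mxd) 0
        if base > 0 then cpInner n mxd s base curr else curr) curr).length : Int) = 2*mxd+1 ∧
    (∀ j : Int, 0 ≤ j → j < 2*mxd+1 →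
      PySem.List.pyGetD ((PySem.List.pyRange σ (mxd+1) 1).foldl (fun curr s =>
        let base := PySem.List.pyGetD prev (s + mxd) 0
        if base > 0 then cpInner n mxd s base curr else curr) curr) j 0
        = (∑ s ∈ Finset.Icc (-mxd) mxd, pvW first (j - mxd - s) * pvC m s) % pvMOD) := by
  intro k
  induction k with
  | zero =>
      intro σ curr hσk hσ0 hlen hcur
      rw [PySem.List.pyRange_one_eq_nil (by omega)]
      refine ⟨hlen, fun j hj0 hj1 => ?_⟩
      simp only [List.foldl_nil]
      rw [hcur j hj0 hj1, show σ - 1 = mxd from by omega]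
  | succ k ih =>
      intro σ curr hσk hσ0 hlen hcur
      rw [PySem.List.pyRange_one_cons (by omega)]
      simp only [List.foldl_cons]
      have hbase : PySem.List.pyGetD prev (σ + mxd) 0 = pvC m σ := by
        have := hprev (σ + mxd) (by omega) (by omega)
        rwa [show σ + mxd - mxd = σ from by ring] at this
      have hred : ∀ j : Int, 0 ≤ j → j < (curr.length:Int) →
          0 ≤ PySem.List.pyGetD curr j 0 ∧ PySem.List.pyGetD curr j 0 < pvMOD := by
        intro j hj0 hj1
        rw [hlen] at hj1
        rw [hcur j hj0 hj1]
        exact ⟨Int.emod_nonneg _ (by norm_num [pvMOD]), Int.emod_lt_of_pos _ (by norm_num [pvMOD])⟩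
      have hnext : ∀ curr' : List Int, (curr'.length:Int) = 2*mxd+1 →
          (∀ j : Int, 0 ≤ j → j < 2*mxd+1 →
            PySem.List.pyGetD curr' j 0
              = (∑ s ∈ Finset.Icc (-mxd) σ, pvW first (j - mxd - s) * pvC m s) % pvMOD) →
          _ := fun curr' h1 h2 => ih (σ+1) curr' (by omega) (by omega) h1
            (by intro j hj0 hj1; rw [show σ + 1 - 1 = σ from by ring]; exact h2 j hj0 hj1)
      by_cases hpos : PySem.List.pyGetD prev (σ + mxd) 0 > 0
      · rw [if_pos hpos]
        obtain ⟨hL, hG⟩ := cpInner_spec first n mxd σ (PySem.List.pyGetD prev (σ + mxd) 0) hf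
          (by rw [hbase]; exact pvC_nonneg m σ) (by rw [hbase]; exact pvC_lt m σ) curr hlen hred
        apply hnext
        · rw [hL]; exact hlen
        · intro j hj0 hj1
          rw [hG j hj0 (show j < (curr.length:Int) by omega), hcur j hj0 hj1, hbase,
            Int.emod_add_emod]
          conv_rhs => rw [sum_Icc_top _ _ _ (show -mxd ≤ σ by omega)]
      · rw [if_neg hpos]
        apply hnext _ hlen
        intro j hj0 hj1
        have hz : pvC m σ = 0 := by
          have h1 := pvC_nonneg m σ
          rw [hbase] at hpos; omega
        rw [hcur j hj0 hj1]
        conv_rhs => rw [sum_Icc_top _ _ _ (show -mxd ≤ σ by omega)]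
        rw [hz, mul_zero, add_zero]

lemma rowSum_reindex (m : Nat) (first : Bool) (mxd t : Int) (hm9 : 9 * (m:Int) ≤ mxd)
    (ht : -mxd ≤ t ∧ t ≤ mxd) :
    (∑ s ∈ Finset.Icc (-mxd) mxd, pvW first (t - s) * pvC m s)
      = ∑ d ∈ Finset.Icc (-9:Int) 9, pvW first d * pvC m (t - d) := by
  have hAU : (∑ s ∈ Finset.Icc (-mxd) mxd, pvW first (t - s) * pvC m s)
      = ∑ s ∈ Finset.Icc (-mxd) mxd ∪ Finset.Icc (t-9) (t+9), pvW first (t - s) * pvC m s := by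
    apply Finset.sum_subset Finset.subset_union_left
    intro s _ hs
    simp only [Finset.mem_Icc] at hs
    rw [pvC_vanish m s (by obtain h' | h' := abs_cases s <;> omega), mul_zero]
  have hBU : (∑ s ∈ Finset.Icc (t-9) (t+9), pvW first (t - s) * pvC m s)
      = ∑ s ∈ Finset.Icc (-mxd) mxd ∪ Finset.Icc (t-9) (t+9), pvW first (t - s) * pvC m s := by
    apply Finset.sum_subset Finset.subset_union_right
    intro s _ hs
    simp only [Finset.mem_Icc] at hs
    rw [pvW_eq_zero first (t - s) (by obtain h' | h' := abs_cases (t - s) <;> omega), zero_mul]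
  rw [hAU, ← hBU]
  apply Finset.sum_nbij' (i := fun s => t - s) (j := fun d => t - d)
  · intro s hs; simp only [Finset.mem_Icc] at *; omega
  · intro d hd; simp only [Finset.mem_Icc] at *; omega
  · intro s _; ring
  · intro d _; ring
  · intro s _; rw [show t - (t - s) = s from by ring]

lemma cpRow_spec (m : Nat) (n mxd : Int) (hf : n = 1 ↔ (m == 0) = true) (hm9 : 9 * (m:Int) ≤ mxd)
    (prev : List Int)
    (hprev : ∀ i : Int, 0 ≤ i → i < 2*mxd+1 → PySem.List.pyGetD prev i 0 = pvC m (i - mxd)) :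
    ((cpRow n mxd prev).length : Int) = 2*mxd+1 ∧
    (∀ i : Int, 0 ≤ i → i < 2*mxd+1 → PySem.List.pyGetD (cpRow n mxd prev) i 0 = pvC (m+1) (i - mxd)) := by
  have hmxd : 0 ≤ mxd := by omega
  have hlen0 : ((List.replicate (2*mxd+1).toNat (0:Int)).length : Int) = 2*mxd+1 := by
    rw [List.length_replicate]; omega
  have hcur0 : ∀ j : Int, 0 ≤ j → j < 2*mxd+1 →
      PySem.List.pyGetD (List.replicate (2*mxd+1).toNat (0:Int)) j 0
        = (∑ s ∈ Finset.Icc (-mxd) (-mxd-1), pvW (m == 0) (j - mxd - s) * pvC m s) % pvMOD := by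
    intro j hj0 hj1
    rw [Finset.Icc_eq_empty (by omega), Finset.sum_empty]
    rw [PySem.List.pyGetD_eq_getElem _ _ hj0 (by rw [hlen0]; exact hj1)]
    simp
  obtain ⟨hL, hG⟩ := rowAux (m == 0) n mxd m hf prev hprev (2*mxd+1).toNat (-mxd)
    (List.replicate (2*mxd+1).toNat 0) (by omega) (by omega) hlen0 hcur0
  refine ⟨hL, fun i hi0 hi1 => ?_⟩
  rw [show cpRow n mxd prev = (PySem.List.pyRange (-mxd) (mxd+1) 1).foldl (fun curr s =>
      let base := PySem.List.pyGetD prev (s + mxd) 0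
      if base > 0 then cpInner n mxd s base curr else curr)
      (List.replicate (2*mxd+1).toNat 0) from rfl]
  rw [hG i hi0 hi1]
  rw [rowSum_reindex m (m == 0) mxd (i - mxd) hm9 (by omega)]
  rw [pvC_succ]

lemma loopA (N : Int) : ∀ (k m : Nat) (prev : List Int), (m:Int) + (k:Int) = N →
    (∀ i : Int, 0 ≤ i → i < 2*(9*N)+1 → PySem.List.pyGetD prev i 0 = pvC m (i - 9*N)) →
    (prev.length : Int) = 2*(9*N)+1 →
    ∀ i : Int, 0 ≤ i → i < 2*(9*N)+1 →
      PySem.List.pyGetD (((PySem.List.pyRange ((m:Int)+1) (N+1) 1).foldl (fun prev n =>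
        cpRow n (9*N) prev) prev)) i 0 = pvC (m+k) (i - 9*N) := by
  intro k
  induction k with
  | zero =>
      intro m prev hmk hprev hlen i hi0 hi1
      rw [PySem.List.pyRange_one_eq_nil (by omega)]
      simpa using hprev i hi0 hi1
  | succ k ih =>
      intro m prev hmk hprev hlen i hi0 hi1
      rw [PySem.List.pyRange_one_cons (by omega)]
      simp only [List.foldl_cons]
      have hf : ((m:Int)+1) = 1 ↔ (m == 0) = true := by
        constructor
        · intro h; simp only [beq_iff_eq]; omega
        · intro h; simp only [beq_iff_eq] at h; omega
      obtain ⟨hL, hG⟩ := cpRow_spec m ((m:Int)+1) (9*N) hf (by omega) prev hprev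
      have := ih (m+1) (cpRow ((m:Int)+1) (9*N) prev) (by push_cast at hmk ⊢; omega) hG hL i hi0 hi1
      rw [show ((m:Int) + 1 + 1) = (((m+1 : Nat)):Int) + 1 from by push_cast; ring]
      rw [this, show m + 1 + k = m + (k+1) from by omega]

lemma cp_val (N : Int) (h0 : 0 ≤ N) : cp N = pvC N.toNat 0 := by
  by_cases h1 : N = 1
  · subst h1
    simp only [cp, if_true]
    rw [show (1:Int).toNat = 1 from rfl, pvC_one_zero]
  · unfold cp
    rw [if_neg h1]
    have hmxd : 0 ≤ 9*N := by omega
    have hlen0 : ((PySem.List.pySetD (List.replicate (2*(9*N)+1).toNat (0:Int)) (9*N) 1).length : Int)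
        = 2*(9*N)+1 := by
      rw [PySem.List.pySetD_of_nonneg _ _ hmxd, List.length_set, List.length_replicate]
      omega
    have hprev0 : ∀ i : Int, 0 ≤ i → i < 2*(9*N)+1 →
        PySem.List.pyGetD (PySem.List.pySetD (List.replicate (2*(9*N)+1).toNat (0:Int)) (9*N) 1) i 0
          = pvC 0 (i - 9*N) := by
      intro i hi0 hi1
      have hic : i = ((i.toNat:Nat):Int) := by omega
      have hmc : 9*N = (((9*N).toNat:Nat):Int) := by omega
      rw [hic, hmc, PySem.List.pyGetD_pySetD_natCast _ _ _ _ _ (by rw [List.length_replicate]; omega)]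
      simp only [pvC]
      by_cases hieq : i.toNat = (9*N).toNat
      · rw [if_pos hieq, if_pos (by omega)]
      · rw [if_neg hieq, if_neg (by omega)]
        rw [PySem.List.pyGetD_eq_getElem _ _ (by omega) (by rw [List.length_replicate]; omega)]
        simp
    have := loopA N N.toNat 0 _ (by omega) hprev0 hlen0 (9*N) (by omega) (by omega)
    norm_num at this
    rw [this]

-- ============ B-side: polynomial semantics ============

noncomputable def toPoly (a : List Int) : Polynomial (ZMod 1000000007) :=
  ∑ i ∈ Finset.range a.length, Polynomial.C ((a.getD i 0 : Int) : ZMod 1000000007) * Polynomial.X ^ i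

def pvFirstL : List Int := (PySem.List.pyRange (-8) 9 1).map (fun d => if d = 0 then 0 else 9 - |d|)
def pvRestL : List Int := (PySem.List.pyRange (-9) 10 1).map (fun d => if d = 0 then 0 else 10 - |d|)

lemma coeff_toPoly (a : List Int) (k : Nat) :
    (toPoly a).coeff k = ((a.getD k 0 : Int) : ZMod 1000000007) := by
  unfold toPoly
  rw [Polynomial.finset_sum_coeff]
  simp only [Polynomial.coeff_C_mul, Polynomial.coeff_X_pow, mul_ite, mul_one, mul_zero]
  rw [Finset.sum_ite_eq (Finset.range a.length) k]
  split_ifs with h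
  · rfl
  · rw [List.getD_eq_default]
    · simp
    · simpa using h

lemma toPoly_set (a : List Int) (n : Nat) (v : Int) (h : n < a.length) :
    toPoly (a.set n v)
      = toPoly a + Polynomial.C (((v:Int) : ZMod 1000000007) - ((a.getD n 0 : Int) : ZMod 1000000007)) * Polynomial.X ^ n := by
  apply Polynomial.ext
  intro k
  rw [Polynomial.coeff_add, coeff_toPoly, coeff_toPoly, Polynomial.coeff_C_mul, Polynomial.coeff_X_pow]
  by_cases hk : k = n
  · subst hk
    rw [if_pos rfl, mul_one, List.getD_eq_getElem _ _ (by simpa using h), List.getElem_set_self (by simpa using h) ]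
    rw [List.getD_eq_getElem _ _ h]
    ring
  · rw [if_neg hk, mul_zero, add_zero]
    by_cases hk2 : k < a.length
    · rw [List.getD_eq_getElem _ _ (by simpa using hk2), List.getD_eq_getElem _ _ hk2,
        List.getElem_set_ne (by omega)]
    · rw [List.getD_eq_default _ _ (by simpa using hk2), List.getD_eq_default _ _ (by omega)]

lemma cast_emod (x : Int) :
    ((x % pvMOD : Int) : ZMod 1000000007) = ((x : Int) : ZMod 1000000007) := by
  rw [Int.emod_def]
  push_cast
  have hp : ((pvMOD : Int) : ZMod 1000000007) = 0 := by
    rw [show pvMOD = ((1000000007:Nat) : Int) from rfl]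
    push_cast
    exact ZMod.natCast_self 1000000007
  rw [hp]
  ring

lemma cast_pvMod (x : Int) :
    ((PySem.Int.mod x pvMOD : Int) : ZMod 1000000007) = ((x : Int) : ZMod 1000000007) := by
  rw [PySem.Int.mod_eq_emod_of_pos (by norm_num [pvMOD]), Int.emod_def]
  push_cast
  have hp : ((pvMOD : Int) : ZMod 1000000007) = 0 := by
    rw [show pvMOD = ((1000000007:Nat) : Int) from rfl]
    push_cast
    exact ZMod.natCast_self 1000000007
  rw [hp]
  ring

lemma setAccum (l : List (Int × Int)) : ∀ (out : List Int),
    (∀ p ∈ l, 0 ≤ p.1 ∧ p.1 < (out.length : Int)) →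
    ((l.foldl (fun o p => PySem.List.pySetD o p.1 (PySem.Int.mod (PySem.List.pyGetD o p.1 0 + p.2) pvMOD)) out).length = out.length) ∧
    toPoly (l.foldl (fun o p => PySem.List.pySetD o p.1 (PySem.Int.mod (PySem.List.pyGetD o p.1 0 + p.2) pvMOD)) out)
      = toPoly out + (l.map (fun p => Polynomial.C ((p.2 : Int) : ZMod 1000000007) * Polynomial.X ^ p.1.toNat)).sum := by
  induction l with
  | nil => intro out _; simp
  | cons q l ih =>
      intro out hin
      obtain ⟨hq0, hq1⟩ := hin q (by simp)
      simp only [List.foldl_cons, List.map_cons, List.sum_cons]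
      set w := PySem.Int.mod (PySem.List.pyGetD out q.1 0 + q.2) pvMOD with hw
      have hset : PySem.List.pySetD out q.1 w = out.set q.1.toNat w :=
        PySem.List.pySetD_of_nonneg _ _ hq0
      have hlen1 : (out.set q.1.toNat w).length = out.length := List.length_set ..
      have hget : PySem.List.pyGetD out q.1 0 = out.getD q.1.toNat 0 := by
        rw [PySem.List.pyGetD_eq_getElem _ _ hq0 hq1, List.getD_eq_getElem _ _ (by omega)]
      have hpoly1 : toPoly (out.set q.1.toNat w)
          = toPoly out + Polynomial.C ((q.2 : Int) : ZMod 1000000007) * Polynomial.X ^ q.1.toNat := by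
        rw [toPoly_set _ _ _ (by omega)]
        congr 1
        congr 1
        rw [hw, cast_pvMod, hget]
        push_cast
        ring
      obtain ⟨ihL, ihP⟩ := ih (out.set q.1.toNat w) (by rw [hlen1]; exact fun p hp => hin p (by simp [hp]))
      rw [hset]
      refine ⟨by rw [ihL, hlen1], ?_⟩
      rw [ihP, hpoly1]
      ring

lemma toPoly_cons (x : Int) (xs : List Int) :
    toPoly (x :: xs) = Polynomial.C ((x : Int) : ZMod 1000000007) + Polynomial.X * toPoly xs := by
  apply Polynomial.ext
  intro k
  rw [Polynomial.coeff_add, coeff_toPoly]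
  cases k with
  | zero => simp [Polynomial.mul_coeff_zero]
  | succ k => rw [Polynomial.coeff_X_mul, coeff_toPoly, Polynomial.coeff_C]; simp

lemma toPoly_enum_aux (b : List Int) : ∀ (s : Nat),
    ((PySem.List.enumerate b ((s:Nat):Int)).map (fun p => Polynomial.C ((p.2 : Int) : ZMod 1000000007) * Polynomial.X ^ p.1.toNat)).sum
      = Polynomial.X ^ s * toPoly b := by
  induction b with
  | nil => intro s; simp [PySem.List.enumerate_nil, toPoly]
  | cons x xs ih =>
      intro s
      rw [PySem.List.enumerate_cons]
      simp only [List.map_cons, List.sum_cons]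
      rw [show ((s:Nat):Int) + 1 = (((s+1:Nat)):Int) from by push_cast; ring, ih (s+1)]
      rw [toPoly_cons]
      rw [show ((s:Int)).toNat = s from by omega]
      ring

lemma toPoly_enum (b : List Int) :
    ((PySem.List.enumerate b).map (fun p => Polynomial.C ((p.2 : Int) : ZMod 1000000007) * Polynomial.X ^ p.1.toNat)).sum
      = toPoly b := by
  have := toPoly_enum_aux b 0
  simpa using this

lemma innerAccum (i x : Int) (hi : 0 ≤ i) (b out : List Int)
    (hbound : i.toNat + b.length ≤ out.length) :
    (pvMulInner i x b out).length = out.length ∧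
    toPoly (pvMulInner i x b out)
      = toPoly out + Polynomial.C ((x : Int) : ZMod 1000000007) * Polynomial.X ^ i.toNat * toPoly b := by
  have hrw : pvMulInner i x b out
      = ((PySem.List.enumerate b).map (fun jy => (i + jy.1, x * jy.2))).foldl
          (fun o p => PySem.List.pySetD o p.1 (PySem.Int.mod (PySem.List.pyGetD o p.1 0 + p.2) pvMOD)) out := by
    unfold pvMulInner
    rw [List.foldl_map]
  have hmem : ∀ jy ∈ PySem.List.enumerate b, 0 ≤ jy.1 ∧ jy.1 < (b.length : Int) := by
    intro jy hjy
    rw [PySem.List.mem_enumerate_iff] at hjy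
    obtain ⟨k, hk, rfl⟩ := hjy
    constructor <;> simp <;> omega
  have hin : ∀ p ∈ (PySem.List.enumerate b).map (fun jy => (i + jy.1, x * jy.2)),
      0 ≤ p.1 ∧ p.1 < (out.length : Int) := by
    intro p hp
    rw [List.mem_map] at hp
    obtain ⟨jy, hjy, rfl⟩ := hp
    obtain ⟨h1, h2⟩ := hmem jy hjy
    constructor <;> simp <;> omega
  obtain ⟨hL, hP⟩ := setAccum _ out hin
  rw [hrw]
  refine ⟨hL, ?_⟩
  rw [hP]
  congr 1
  rw [List.map_map]
  have hcong : ((PySem.List.enumerate b).map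
        ((fun p : Int × Int => Polynomial.C ((p.2 : Int) : ZMod 1000000007) * Polynomial.X ^ p.1.toNat)
          ∘ (fun jy => (i + jy.1, x * jy.2))))
      = (PySem.List.enumerate b).map (fun jy =>
          Polynomial.C ((x : Int) : ZMod 1000000007) * Polynomial.X ^ i.toNat *
            (Polynomial.C ((jy.2 : Int) : ZMod 1000000007) * Polynomial.X ^ jy.1.toNat)) := by
    apply List.map_congr_left
    intro jy hjy
    obtain ⟨h1, h2⟩ := hmem jy hjy
    simp only [Function.comp_apply]
    rw [show (i + jy.1).toNat = i.toNat + jy.1.toNat from by omega, pow_add]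
    push_cast
    rw [map_mul]
    ring
  rw [hcong, List.sum_map_mul_left, toPoly_enum]

lemma outerAccum (b : List Int) (l : List (Int × Int)) : ∀ (out : List Int),
    (∀ p ∈ l, 0 ≤ p.1 ∧ p.1.toNat + b.length ≤ out.length) →
    ((l.foldl (fun o p => if p.2 ≠ 0 then pvMulInner p.1 p.2 b o else o) out).length = out.length) ∧
    toPoly (l.foldl (fun o p => if p.2 ≠ 0 then pvMulInner p.1 p.2 b o else o) out)
      = toPoly out
        + (l.map (fun p => Polynomial.C ((p.2 : Int) : ZMod 1000000007) * Polynomial.X ^ p.1.toNat)).sum * toPoly b := by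
  induction l with
  | nil => intro out _; simp
  | cons q l ih =>
      intro out hin
      obtain ⟨hq0, hq1⟩ := hin q (by simp)
      simp only [List.foldl_cons, List.map_cons, List.sum_cons]
      by_cases hz : q.2 ≠ 0
      · rw [if_pos hz] at *
        obtain ⟨hL1, hP1⟩ := innerAccum q.1 q.2 hq0 b out hq1
        obtain ⟨hL2, hP2⟩ := ih (pvMulInner q.1 q.2 b out) (by rw [hL1]; exact fun p hp => hin p (by simp [hp]))
        refine ⟨by rw [hL2, hL1], ?_⟩
        rw [hP2, hP1]
        ring
      · rw [if_neg hz]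
        push_neg at hz
        obtain ⟨hL2, hP2⟩ := ih out (fun p hp => hin p (by simp [hp]))
        refine ⟨hL2, ?_⟩
        rw [hP2, hz]
        simp

lemma toPoly_replicate_zero (n : Nat) : toPoly (List.replicate n (0:Int)) = 0 := by
  apply Polynomial.ext
  intro k
  rw [coeff_toPoly]
  by_cases hk : k < n
  · rw [List.getD_eq_getElem _ _ (by simpa using hk)]
    simp
  · rw [List.getD_eq_default _ _ (by simpa using hk)]
    simp

lemma toPoly_pvMul (a b : List Int) (ha : a ≠ []) (hb : b ≠ []) :
    (pvMul a b).length = a.length + b.length - 1 ∧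
    toPoly (pvMul a b) = toPoly a * toPoly b := by
  have hmem : ∀ p ∈ PySem.List.enumerate a, 0 ≤ p.1 ∧ p.1.toNat + b.length ≤ (List.replicate (a.length + b.length - 1) (0:Int)).length := by
    intro p hp
    rw [PySem.List.mem_enumerate_iff] at hp
    obtain ⟨k, hk, rfl⟩ := hp
    rw [List.length_replicate]
    have hb1 : 1 ≤ b.length := List.length_pos_iff.mpr hb
    constructor <;> simp <;> omega
  obtain ⟨hL, hP⟩ := outerAccum b (PySem.List.enumerate a) _ hmem
  unfold pvMul
  constructor
  · rw [hL, List.length_replicate]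
  · rw [hP, toPoly_replicate_zero, toPoly_enum, zero_add]

lemma foldl_set_bounds (l : List (Int × Int)) : ∀ (out : List Int),
    (∀ p ∈ l, 0 ≤ p.1) → (∀ y ∈ out, 0 ≤ y ∧ y < pvMOD) →
    ∀ y ∈ l.foldl (fun o p => PySem.List.pySetD o p.1 (PySem.Int.mod (PySem.List.pyGetD o p.1 0 + p.2) pvMOD)) out,
      0 ≤ y ∧ y < pvMOD := by
  induction l with
  | nil => intro out _ hout; simpa using hout
  | cons q l ih =>
      intro out hin hout
      simp only [List.foldl_cons]
      apply ih _ (fun p hp => hin p (by simp [hp]))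
      intro y hy
      rw [PySem.List.pySetD_of_nonneg _ _ (hin q (by simp))] at hy
      rcases List.mem_or_eq_of_mem_set hy with h | h
      · exact hout y h
      · subst h
        exact ⟨PySem.Int.mod_nonneg _ (by norm_num [pvMOD]), PySem.Int.mod_lt _ (by norm_num [pvMOD])⟩

lemma pvMul_entries (a b : List Int) : ∀ y ∈ pvMul a b, 0 ≤ y ∧ y < pvMOD := by
  unfold pvMul
  have hgen : ∀ (l : List (Int × Int)) (out : List Int),
      (∀ p ∈ l, 0 ≤ p.1) → (∀ y ∈ out, 0 ≤ y ∧ y < pvMOD) →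
      ∀ y ∈ l.foldl (fun o p => if p.2 ≠ 0 then pvMulInner p.1 p.2 b o else o) out,
        0 ≤ y ∧ y < pvMOD := by
    intro l
    induction l with
    | nil => intro out _ hout; simpa using hout
    | cons q l ih =>
        intro out hin hout
        simp only [List.foldl_cons]
        apply ih _ (fun p hp => hin p (by simp [hp]))
        by_cases hz : q.2 ≠ 0
        · rw [if_pos hz]
          have hq0 := hin q (by simp)
          have hrw : pvMulInner q.1 q.2 b out
              = ((PySem.List.enumerate b).map (fun jy => (q.1 + jy.1, q.2 * jy.2))).foldl
                  (fun o p => PySem.List.pySetD o p.1 (PySem.Int.mod (PySem.List.pyGetD o p.1 0 + p.2) pvMOD)) out := by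
            unfold pvMulInner
            rw [List.foldl_map]
          rw [hrw]
          apply foldl_set_bounds _ _ ?_ hout
          intro p hp
          rw [List.mem_map] at hp
          obtain ⟨jy, hjy, rfl⟩ := hp
          rw [PySem.List.mem_enumerate_iff] at hjy
          obtain ⟨k, hk, rfl⟩ := hjy
          simp only []
          omega
        · rw [if_neg hz]; exact hout
  apply hgen
  · intro p hp
    rw [PySem.List.mem_enumerate_iff] at hp
    obtain ⟨k, hk, rfl⟩ := hp
    simp
  · intro y hy
    rw [List.eq_of_mem_replicate hy]
    norm_num [pvMOD]

lemma powLoop_aux (n : Nat) : ∀ (e : Int), e.toNat ≤ n → ∀ (acc base : List Int), acc ≠ [] → base ≠ [] →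
    (pvPowLoop acc base e).length = acc.length + (base.length - 1) * e.toNat ∧
    toPoly (pvPowLoop acc base e) = toPoly acc * toPoly base ^ e.toNat := by
  induction n with
  | zero =>
      intro e he acc base ha hb
      rw [pvPowLoop, dif_neg (by omega)]
      rw [show e.toNat = 0 from by omega]
      simp
  | succ n ih =>
      intro e he acc base ha hb
      by_cases hpos : 0 < e
      · rw [pvPowLoop, dif_pos hpos]
        have hfd0 : PySem.Int.floordiv e 2 = e / 2 := PySem.Int.floordiv_eq_ediv_of_pos (by norm_num)
        have hband0 : PySem.Int.band e 1 = e % 2 := by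
          rw [PySem.Int.band_one, PySem.Int.mod_eq_emod_of_pos (by norm_num)]
        rw [hband0, hfd0]
        obtain ⟨hbL, hbP⟩ := toPoly_pvMul base base hb hb
        have hbne : pvMul base base ≠ [] := by
          apply List.ne_nil_of_length_pos
          rw [hbL]
          have := List.length_pos_iff.mpr hb
          omega
        obtain ⟨u, hu⟩ : ∃ u, base.length = u + 1 :=
          ⟨base.length - 1, by have := List.length_pos_iff.mpr hb; omega⟩
        have hseq : e.toNat = 2 * (e / 2).toNat + (e % 2).toNat := by omega
        by_cases hpar : e % 2 = 1
        · rw [if_pos hpar]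
          obtain ⟨haL, haP⟩ := toPoly_pvMul acc base ha hb
          have hane : pvMul acc base ≠ [] := by
            apply List.ne_nil_of_length_pos
            rw [haL]
            have h1 := List.length_pos_iff.mpr ha
            omega
          obtain ⟨hL, hP⟩ := ih (e / 2) (by omega) (pvMul acc base) (pvMul base base) hane hbne
          constructor
          · rw [hL, haL, hbL, hu]
            rw [show acc.length + (u+1) - 1 = acc.length + u from by omega,
              show (u+1) + (u+1) - 1 - 1 = 2*u from by omega,
              show (u+1) - 1 = u from by omega,
              show e.toNat = 2 * (e/2).toNat + 1 from by omega]
            ring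
          · rw [hP, haP, hbP, hseq, show (e % 2).toNat = 1 from by omega]
            ring
        · rw [if_neg hpar]
          obtain ⟨hL, hP⟩ := ih (e / 2) (by omega) acc (pvMul base base) ha hbne
          constructor
          · rw [hL, hbL, hu]
            rw [show (u+1) + (u+1) - 1 - 1 = 2*u from by omega,
              show e.toNat = 2 * (e/2).toNat from by omega,
              show (u+1) - 1 = u from by omega]
            ring
          · rw [hP, hbP, hseq, show (e % 2).toNat = 0 from by omega]
            ring
      · rw [pvPowLoop, dif_neg hpos]
        rw [show e.toNat = 0 from by omega]
        simp

lemma powLoop_spec (e : Int) (acc base : List Int) (ha : acc ≠ []) (hb : base ≠ []) :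
    (pvPowLoop acc base e).length = acc.length + (base.length - 1) * e.toNat ∧
    toPoly (pvPowLoop acc base e) = toPoly acc * toPoly base ^ e.toNat :=
  powLoop_aux e.toNat e le_rfl acc base ha hb

lemma pvFirstL_getD (k : Nat) : pvFirstL.getD k 0 = pvW true ((k:Int) - 8) := by
  by_cases hk : k < 17
  · interval_cases k <;> decide
  · rw [List.getD_eq_default _ _ (by rw [show pvFirstL.length = 17 from by decide]; omega)]
    rw [pvW_first_eq_zero _ (by obtain h' | h' := abs_cases ((k:Int) - 8) <;> omega)]

lemma pvRestL_getD (k : Nat) : pvRestL.getD k 0 = pvW false ((k:Int) - 9) := by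
  by_cases hk : k < 19
  · interval_cases k <;> decide
  · rw [List.getD_eq_default _ _ (by rw [show pvRestL.length = 19 from by decide]; omega)]
    rw [pvW_eq_zero _ _ (by obtain h' | h' := abs_cases ((k:Int) - 9) <;> omega)]

lemma stepSum (m : Nat) (k : Nat) :
    ∑ i ∈ Finset.range (k+1), pvC (m+1) ((i:Int) - 8 - 9*m) * pvW false (((k-i : Nat):Int) - 9)
      = ∑ d ∈ Finset.Icc (-9:Int) 9, pvW false d * pvC (m+1) ((k:Int) - 17 - 9*m - d) := by
  have hL : ∑ i ∈ Finset.range (k+1), pvC (m+1) ((i:Int) - 8 - 9*m) * pvW false (((k-i : Nat):Int) - 9)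
      = ∑ x ∈ Finset.Icc (0:Int) k, pvC (m+1) (x - 8 - 9*m) * pvW false ((k:Int) - x - 9) := by
    apply Finset.sum_nbij' (i := fun (i : Nat) => (i:Int)) (j := fun (x : Int) => x.toNat)
    · intro i hi; simp only [Finset.mem_range] at hi; simp only [Finset.mem_Icc]; omega
    · intro x hx; simp only [Finset.mem_Icc] at hx; simp only [Finset.mem_range]; omega
    · intro i hi; simp only [Finset.mem_range] at hi; omega
    · intro x hx; simp only [Finset.mem_Icc] at hx; omega
    · intro i hi
      simp only [Finset.mem_range] at hi
      have : ((k - i : Nat) : Int) = (k:Int) - (i:Int) := by omega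
      rw [this]
  have hR : ∑ d ∈ Finset.Icc (-9:Int) 9, pvW false d * pvC (m+1) ((k:Int) - 17 - 9*m - d)
      = ∑ x ∈ Finset.Icc ((k:Int)-18) k, pvC (m+1) (x - 8 - 9*m) * pvW false ((k:Int) - x - 9) := by
    apply Finset.sum_nbij' (i := fun d => (k:Int) - 9 - d) (j := fun x => (k:Int) - 9 - x)
    · intro d hd; simp only [Finset.mem_Icc] at *; omega
    · intro x hx; simp only [Finset.mem_Icc] at *; omega
    · intro d _; ring
    · intro x _; ring
    · intro d hd
      have h1 : (k:Int) - 17 - 9*m - d = ((k:Int) - 9 - d) - 8 - 9*m := by ring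
      have h2 : (k:Int) - ((k:Int) - 9 - d) - 9 = d := by ring
      rw [h1, h2]
      ring
  rw [hL, hR]
  have hAU : ∑ x ∈ Finset.Icc (0:Int) k, pvC (m+1) (x - 8 - 9*m) * pvW false ((k:Int) - x - 9)
      = ∑ x ∈ Finset.Icc (0:Int) k ∪ Finset.Icc ((k:Int)-18) k, pvC (m+1) (x - 8 - 9*m) * pvW false ((k:Int) - x - 9) := by
    apply Finset.sum_subset Finset.subset_union_left
    intro x hx hx2
    simp only [Finset.mem_union, Finset.mem_Icc, not_and, not_le] at hx hx2
    rw [pvC_vanish' (m+1) (x - 8 - 9*m) (by omega)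
      (by push_cast; obtain h' | h' := abs_cases (x - 8 - 9*(m:Int)) <;> omega), zero_mul]
  have hBU : ∑ x ∈ Finset.Icc ((k:Int)-18) k, pvC (m+1) (x - 8 - 9*m) * pvW false ((k:Int) - x - 9)
      = ∑ x ∈ Finset.Icc (0:Int) k ∪ Finset.Icc ((k:Int)-18) k, pvC (m+1) (x - 8 - 9*m) * pvW false ((k:Int) - x - 9) := by
    apply Finset.sum_subset Finset.subset_union_right
    intro x hx hx2
    simp only [Finset.mem_union, Finset.mem_Icc, not_and, not_le] at hx hx2
    rw [pvW_eq_zero false ((k:Int) - x - 9) (by obtain h' | h' := abs_cases ((k:Int) - x - 9) <;> omega), mul_zero]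
  rw [hAU, ← hBU]

lemma coeffFR (m : Nat) : ∀ k : Nat,
    (toPoly pvFirstL * toPoly pvRestL ^ m).coeff k
      = ((pvC (m+1) ((k:Int) - 8 - 9*m) : Int) : ZMod 1000000007) := by
  induction m with
  | zero =>
      intro k
      rw [pow_zero, mul_one, coeff_toPoly, pvFirstL_getD, pvC_one]
      norm_num
  | succ m ih =>
      intro k
      rw [pow_succ, ← mul_assoc, Polynomial.coeff_mul,
        Finset.Nat.sum_antidiagonal_eq_sum_range_succ_mk]
      have hterm : ∀ i ∈ Finset.range (k+1),
          (toPoly pvFirstL * toPoly pvRestL ^ m).coeff i * (toPoly pvRestL).coeff (k - i)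
            = ((pvC (m+1) ((i:Int) - 8 - 9*m) * pvW false (((k-i : Nat):Int) - 9) : Int) : ZMod 1000000007) := by
        intro i _
        rw [ih i, coeff_toPoly, pvRestL_getD]
        push_cast
        ring
      rw [Finset.sum_congr rfl hterm, ← Int.cast_sum, stepSum m k]
      rw [pvC_succ]
      simp only [show ((m+1 : Nat) == 0) = false from by simp]
      rw [cast_emod]
      congr 1
      apply Finset.sum_congr rfl
      intro d _
      congr 1
      push_cast
      ring

lemma toPoly_one : toPoly [(1:Int)] = 1 := by
  unfold toPoly
  simp

lemma cast_inj_bounds (x y : Int) (hx0 : 0 ≤ x) (hx1 : x < pvMOD) (hy0 : 0 ≤ y) (hy1 : y < pvMOD)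
    (h : ((x : Int) : ZMod 1000000007) = ((y : Int) : ZMod 1000000007)) : x = y := by
  rw [ZMod.intCast_eq_intCast_iff] at h
  have h2 : x % ((1000000007:Nat):Int) = y % ((1000000007:Nat):Int) := h
  rw [Int.emod_eq_of_lt hx0 (by norm_num [pvMOD] at hx1 ⊢; omega),
    Int.emod_eq_of_lt hy0 (by norm_num [pvMOD] at hy1 ⊢; omega)] at h2
  exact h2

lemma cp_alt_val (N : Int) (h0 : 1 ≤ N) : cp_alt N = pvC N.toNat 0 := by
  by_cases h1 : N = 1
  · subst h1
    simp only [cp_alt, if_true]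
    rw [show (1:Int).toNat = 1 from rfl, pvC_one_zero]
  · have h2 : 2 ≤ N := by omega
    unfold cp_alt
    rw [if_neg h1]
    have hone : ([(1:Int)] : List Int) ≠ [] := by decide
    have hRne : pvRestL ≠ [] := by decide
    have hFne : pvFirstL ≠ [] := by decide
    obtain ⟨hPL, hPP⟩ := powLoop_spec (N-1) [1] pvRestL hone hRne
    have hPne : pvPowLoop [1] pvRestL (N-1) ≠ [] := by
      apply List.ne_nil_of_length_pos
      rw [hPL]
      norm_num
    obtain ⟨hML, hMP⟩ := toPoly_pvMul pvFirstL (pvPowLoop [1] pvRestL (N-1)) hFne hPne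
    set m := (N-1).toNat with hm
    have hflen : (pvMul pvFirstL (pvPowLoop [1] pvRestL (N-1))).length = 18*m + 17 := by
      rw [hML, hPL, show pvFirstL.length = 17 from by decide, show pvRestL.length = 19 from by decide]
      simp only [List.length_singleton]
      omega
    show PySem.List.pyGetD (pvMul pvFirstL (pvPowLoop [1] pvRestL (N-1)))
      (PySem.Int.floordiv (((pvMul pvFirstL (pvPowLoop [1] pvRestL (N-1))).length : Int) - 1) 2) 0 = pvC N.toNat 0
    have hidx : PySem.Int.floordiv (((pvMul pvFirstL (pvPowLoop [1] pvRestL (N-1))).length : Int) - 1) 2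
        = (((9*m + 8 : Nat)) : Int) := by
      rw [hflen, PySem.Int.floordiv_eq_ediv_of_pos (by norm_num)]
      push_cast
      omega
    rw [hidx, PySem.List.pyGetD_natCast]
    have hcoeff : (toPoly (pvMul pvFirstL (pvPowLoop [1] pvRestL (N-1)))).coeff (9*m+8)
        = ((pvC (m+1) 0 : Int) : ZMod 1000000007) := by
      rw [hMP, hPP, toPoly_one, one_mul]
      rw [coeffFR m (9*m+8)]
      congr 2
      push_cast
      ring
    rw [coeff_toPoly] at hcoeff
    have hmem : (pvMul pvFirstL (pvPowLoop [1] pvRestL (N-1))).getD (9*m+8) 0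
        ∈ pvMul pvFirstL (pvPowLoop [1] pvRestL (N-1)) := by
      rw [List.getD_eq_getElem _ _ (by rw [hflen]; omega)]
      exact List.getElem_mem _
    obtain ⟨hb0, hb1⟩ := pvMul_entries _ _ _ hmem
    have hNm : m + 1 = N.toNat := by omega
    rw [← hNm]
    exact cast_inj_bounds _ _ hb0 hb1 (pvC_nonneg _ _) (pvC_lt _ _) hcoeff

-- ===== VERDICT (by name: the statement is the Claim_ definition above) =====
theorem cp_spec : Claim_equal_cp := by
  intro N _ hpre
  unfold Spec_cp
  exact (cp_val N (by exact le_trans (by norm_num) hpre)).trans (cp_alt_val N hpre).symm
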